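-- pv_equiv track=rewrite | github.com/qubit-ulm/ProtoPlaqette | error_correction_sim/visualizer.py | positions_index
-- ===== SOURCE A (Python) =====
-- def positions_index(errs_recos: str) -> tuple[list, list, list]:
--     """Converts a Pauli string into lists of indices of X, Y and Z operators.
--
--     Args:
--         errs_recos: Pauli string of errors or recovery operation on data qubits
--
--     Returns:
--         positions of X, Y and Z operators in the Pauli string
--     """
--     x_pos = []
--     y_pos = []
--     z_pos = []
--     for pos, char in enumerate(errs_recos):
--         if char == "X":
--             x_pos.append(pos)
--         elif char == "Y":
--             y_pos.append(pos)
--         elif char == "Z":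
--             z_pos.append(pos)
--     return x_pos, y_pos, z_pos
-- ===== SOURCE B (Python) =====
-- def positions_index(errs_recos: str) -> tuple[list, list, list]:
--     enum = list(enumerate(errs_recos))
--     x_pos = [pos for pos, char in enum if char == "X"]
--     y_pos = [pos for pos, char in enum if char == "Y"]
--     z_pos = [pos for pos, char in enum if char == "Z"]
--     return x_pos, y_pos, z_pos
-- ===== Notes on version B (the rewrite author's own statement) =====
-- stated objective: idiomatic
-- what changed: Replaces the single three-branch accumulator loop with three independent filtering comprehensions over enumerate, one pass per Pauli letter.
import Mathlib
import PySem

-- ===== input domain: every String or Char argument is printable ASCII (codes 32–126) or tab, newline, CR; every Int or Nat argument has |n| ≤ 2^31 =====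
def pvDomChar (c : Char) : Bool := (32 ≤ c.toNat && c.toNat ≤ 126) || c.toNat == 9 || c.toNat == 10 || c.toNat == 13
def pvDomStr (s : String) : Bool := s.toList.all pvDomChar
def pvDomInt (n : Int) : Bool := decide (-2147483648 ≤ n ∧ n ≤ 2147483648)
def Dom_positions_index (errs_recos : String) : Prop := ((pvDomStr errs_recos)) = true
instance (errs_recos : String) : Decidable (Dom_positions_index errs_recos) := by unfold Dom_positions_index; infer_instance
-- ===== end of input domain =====

-- B replaces A's single three-branch accumulator loop with three independent filtering passes (idiomatic; return value only).

-- ===== PORT A =====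
-- single loop over enumerate, three accumulators, branch per character
def positions_index (errs_recos : String) : List Int × List Int × List Int :=
  (PySem.List.enumerate errs_recos.toList 0).foldl
    (fun (st : List Int × List Int × List Int) pc =>
      if pc.2 == 'X' then (st.1 ++ [pc.1], st.2.1, st.2.2)
      else if pc.2 == 'Y' then (st.1, st.2.1 ++ [pc.1], st.2.2)
      else if pc.2 == 'Z' then (st.1, st.2.1, st.2.2 ++ [pc.1])
      else st)
    ([], [], [])

-- ===== PORT B =====
-- three independent filtering comprehensions over the same enumerate list
def positions_index_alt (errs_recos : String) : List Int × List Int × List Int :=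
  let enum := PySem.List.enumerate errs_recos.toList 0
  (((enum.filter (fun pc => pc.2 == 'X')).map (·.1)),
   ((enum.filter (fun pc => pc.2 == 'Y')).map (·.1)),
   ((enum.filter (fun pc => pc.2 == 'Z')).map (·.1)))

-- ===== PRECONDITION & SPEC =====
def Spec_positions_index (errs_recos : String) (out : List Int × List Int × List Int) : Prop := out = positions_index_alt errs_recos
instance (errs_recos : String) (out : List Int × List Int × List Int) : Decidable (Spec_positions_index errs_recos out) := by unfold Spec_positions_index; infer_instance

-- ===== CLAIM (what is proved, stated in full; the proofs are below) =====
def Claim_equal_positions_index : Prop := ∀ (errs_recos : String), Dom_positions_index errs_recos → Spec_positions_index errs_recos (positions_index errs_recos)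

-- ===== LEMMAS AND PROOFS =====
theorem positions_index_fold_inv (l : List (Int × Char)) (a b c : List Int) :
    l.foldl
      (fun (st : List Int × List Int × List Int) pc =>
        if pc.2 == 'X' then (st.1 ++ [pc.1], st.2.1, st.2.2)
        else if pc.2 == 'Y' then (st.1, st.2.1 ++ [pc.1], st.2.2)
        else if pc.2 == 'Z' then (st.1, st.2.1, st.2.2 ++ [pc.1])
        else st)
      (a, b, c)
    = (a ++ (l.filter (fun pc => pc.2 == 'X')).map (·.1),
       b ++ (l.filter (fun pc => pc.2 == 'Y')).map (·.1),
       c ++ (l.filter (fun pc => pc.2 == 'Z')).map (·.1)) := by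
  induction l generalizing a b c with
  | nil => simp
  | cons hd tl ih =>
    simp only [List.foldl_cons, List.filter_cons]
    split_ifs with h1 h2 h3 <;> simp_all

-- ===== VERDICT (by name: the statement is the Claim_ definition above) =====
theorem positions_index_spec : Claim_equal_positions_index := by
  intro s _
  show positions_index s = positions_index_alt s
  unfold positions_index positions_index_alt
  rw [positions_index_fold_inv]
  simp
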